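-- pv_equiv track=rewrite | github.com/jasonho2582001/comp0138-pytctracer | data/trace_parser_dynamic.py | naming_convention_contains
-- ===== SOURCE A (Python) =====
-- from collections import defaultdict
-- from typing import Optional, Set, List, Dict, Tuple
--
-- def naming_convention_contains(function_names_tuple: Set[Tuple[str, str]], test_names_tuple: Set[Tuple[str, str]], functions_called_by_each_test_dict: Dict[str, Set[str]]) -> Dict[str, Dict[str, float]]:
--     naming_conventions_contains_dict = defaultdict(dict)
--
--     for test_fully_qualified_name, test_function_name in test_names_tuple:
--         functions_called_by_test = functions_called_by_each_test_dict[test_fully_qualified_name]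
--         for function_fully_qualified_name, function_name in function_names_tuple:
--             if test_function_name.startswith("test_"):
--                 stripped_test_function_name = test_function_name[5:]
--             else:
--                 # assumption that all test functions must begin with test
--                 stripped_test_function_name = test_function_name[4:]
--             naming_conventions_contains_dict[test_fully_qualified_name][function_fully_qualified_name] = (1 if function_name in stripped_test_function_name else 0) if function_fully_qualified_name in functions_called_by_test else 0
--
--     return naming_conventions_contains_dict
-- ===== SOURCE B (Python) =====
-- from collections import defaultdict
--
--
-- def naming_convention_contains(function_names_tuple, test_names_tuple, functions_called_by_each_test_dict):
--     result = defaultdict(dict)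
--     short_name_of = {fqn: short for fqn, short in function_names_tuple}
--     for test_fqn, test_name in test_names_tuple:
--         called = functions_called_by_each_test_dict[test_fqn]
--         stripped = test_name[5:] if test_name.startswith("test_") else test_name[4:]
--         row = {fqn: 0 for fqn, _ in function_names_tuple}
--         for fqn in called:
--             if fqn in short_name_of and short_name_of[fqn] in stripped:
--                 row[fqn] = 1
--         if row:
--             result[test_fqn] = row
--     return result
-- ===== Notes on version B (the rewrite author's own statement) =====
-- stated objective: alternative
-- what changed: B precomputes a fqn->short-name dict and the stripped test name once per test, writes a dense zero row in one pass and then flips to 1 only the called functions whose short name is a substring, instead of A's nested loop that re-strips the test name and tests set membership for every test x function pair.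
import Mathlib
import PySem

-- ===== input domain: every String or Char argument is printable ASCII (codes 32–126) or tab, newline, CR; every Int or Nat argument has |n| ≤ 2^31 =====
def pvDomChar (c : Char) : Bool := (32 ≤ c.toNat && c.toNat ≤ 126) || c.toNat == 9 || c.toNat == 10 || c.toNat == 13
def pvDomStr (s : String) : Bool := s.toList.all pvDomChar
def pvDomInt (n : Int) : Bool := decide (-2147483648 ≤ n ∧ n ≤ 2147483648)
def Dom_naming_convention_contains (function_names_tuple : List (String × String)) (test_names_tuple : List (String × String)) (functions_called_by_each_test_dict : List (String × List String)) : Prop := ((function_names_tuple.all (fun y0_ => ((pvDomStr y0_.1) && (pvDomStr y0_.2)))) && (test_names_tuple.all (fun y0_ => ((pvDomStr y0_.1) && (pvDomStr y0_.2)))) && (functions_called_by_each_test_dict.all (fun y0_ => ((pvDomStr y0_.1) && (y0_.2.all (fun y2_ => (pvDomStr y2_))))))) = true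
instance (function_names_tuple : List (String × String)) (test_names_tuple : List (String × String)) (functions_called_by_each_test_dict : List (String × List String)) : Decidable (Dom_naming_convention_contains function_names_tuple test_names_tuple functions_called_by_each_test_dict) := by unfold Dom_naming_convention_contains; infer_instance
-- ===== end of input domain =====

-- B replaces A's nested test×function loop (re-stripping the test name and testing set membership
-- per pair) by a precomputed fqn→short-name dict, a dense zero row written in one pass per test,
-- and a sparse second pass over the called functions only (objective: alternative).

-- ===== PORT A =====
def naming_convention_contains (function_names_tuple : List (String × String)) (test_names_tuple : List (String × String)) (functions_called_by_each_test_dict : List (String × List String)) : List (String × List (String × Int)) :=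
  let d : PySem.Dict String (PySem.Dict String Int) :=
    test_names_tuple.foldl (fun d tp =>
      -- functions_called_by_test = functions_called_by_each_test_dict[test_fully_qualified_name]
      -- (KeyError when the key is absent: excluded by Pre_; getD totalises)
      let functions_called_by_test : List String :=
        ((PySem.Dict.mk functions_called_by_each_test_dict).get? tp.1).getD []
      function_names_tuple.foldl (fun d fp =>
        let stripped_test_function_name : String :=
          if PySem.Str.startswith tp.2 "test_" then PySem.Str.slice tp.2 (some 5) none
          else PySem.Str.slice tp.2 (some 4) none
        let v : Int :=
          if functions_called_by_test.contains fp.1 then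
            (if PySem.Str.isIn fp.2 stripped_test_function_name then 1 else 0)
          else 0
        d.insert tp.1 ((d.getD tp.1 PySem.Dict.empty).insert fp.1 v)) d)
      PySem.Dict.empty
  d.items.map (fun p => (p.1, p.2.items))

-- ===== PORT B =====
def naming_convention_contains_alt (function_names_tuple : List (String × String)) (test_names_tuple : List (String × String)) (functions_called_by_each_test_dict : List (String × List String)) : List (String × List (String × Int)) :=
  let short_name_of : PySem.Dict String String :=
    function_names_tuple.foldl (fun m p => m.insert p.1 p.2) PySem.Dict.empty
  let result : PySem.Dict String (PySem.Dict String Int) :=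
    test_names_tuple.foldl (fun res tp =>
      let called : List String :=
        ((PySem.Dict.mk functions_called_by_each_test_dict).get? tp.1).getD []
      let stripped : String :=
        if PySem.Str.startswith tp.2 "test_" then PySem.Str.slice tp.2 (some 5) none
        else PySem.Str.slice tp.2 (some 4) none
      let row : PySem.Dict String Int :=
        function_names_tuple.foldl (fun r p => r.insert p.1 (0 : Int)) PySem.Dict.empty
      let row : PySem.Dict String Int :=
        called.foldl (fun r f =>
          match short_name_of.get? f with
          | some short => if PySem.Str.isIn short stripped then r.insert f 1 else r
          | none => r) row
      if row.size ≠ 0 then res.insert tp.1 row else res) PySem.Dict.empty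
  result.items.map (fun p => (p.1, p.2.items))

-- ===== PRECONDITION & SPEC =====
-- Pre_ excludes exactly the inputs on which A raises KeyError: a test fully-qualified name missing
-- from functions_called_by_each_test_dict.
def Pre_naming_convention_contains (function_names_tuple : List (String × String)) (test_names_tuple : List (String × String)) (functions_called_by_each_test_dict : List (String × List String)) : Prop :=
  ∀ tp ∈ test_names_tuple, (PySem.Dict.mk functions_called_by_each_test_dict).contains tp.1 = true
instance (function_names_tuple : List (String × String)) (test_names_tuple : List (String × String)) (functions_called_by_each_test_dict : List (String × List String)) : Decidable (Pre_naming_convention_contains function_names_tuple test_names_tuple functions_called_by_each_test_dict) := by unfold Pre_naming_convention_contains; infer_instance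

def pvWitness_naming_convention_contains : (List (String × String)) × (List (String × String)) × (List (String × List String)) :=
  ([("m.f", "f"), ("m.g", "g")], [("t.test_f", "test_f"), ("t.test_h", "test_h")], [("t.test_f", ["m.f"]), ("t.test_h", [])])

def Spec_naming_convention_contains (function_names_tuple : List (String × String)) (test_names_tuple : List (String × String)) (functions_called_by_each_test_dict : List (String × List String)) (out : List (String × List (String × Int))) : Prop := out = naming_convention_contains_alt function_names_tuple test_names_tuple functions_called_by_each_test_dict
instance (function_names_tuple : List (String × String)) (test_names_tuple : List (String × String)) (functions_called_by_each_test_dict : List (String × List String)) (out : List (String × List (String × Int))) : Decidable (Spec_naming_convention_contains function_names_tuple test_names_tuple functions_called_by_each_test_dict out) := by unfold Spec_naming_convention_contains; infer_instance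

-- ===== CLAIM (what is proved, stated in full; the proofs are below) =====
def Claim_equal_naming_convention_contains : Prop := ∀ (function_names_tuple : List (String × String)) (test_names_tuple : List (String × String)) (functions_called_by_each_test_dict : List (String × List String)), Dom_naming_convention_contains function_names_tuple test_names_tuple functions_called_by_each_test_dict → Pre_naming_convention_contains function_names_tuple test_names_tuple functions_called_by_each_test_dict → Spec_naming_convention_contains function_names_tuple test_names_tuple functions_called_by_each_test_dict (naming_convention_contains function_names_tuple test_names_tuple functions_called_by_each_test_dict)

-- ===== LEMMAS AND PROOFS =====

def pvRowOf {ν : Type} (V : (String × String) → ν) (fns : List (String × String)) (e : PySem.Dict String ν) : PySem.Dict String ν :=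
  fns.foldl (fun r p => r.insert p.1 (V p)) e

theorem pv_get?_rowOf {ν : Type} (V : (String × String) → ν) :
    ∀ (fns : List (String × String)) (e : PySem.Dict String ν) (k : String),
      (pvRowOf V fns e).get? k =
        match fns.reverse.find? (fun p => p.1 == k) with
        | some p => some (V p)
        | none => e.get? k := by
  intro fns
  induction fns with
  | nil => intro e k; simp [pvRowOf]
  | cons p l ih =>
    intro e k
    have h1 : pvRowOf V (p :: l) e = pvRowOf V l (e.insert p.1 (V p)) := rfl
    rw [h1, ih]
    rw [List.reverse_cons, List.find?_append]
    cases hf : l.reverse.find? (fun q => q.1 == k) with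
    | some q => simp
    | none =>
      by_cases hk : p.1 == k
      · have : k = p.1 := by simpa [eq_comm] using (beq_iff_eq.mp hk)
        simp [List.find?, this, PySem.Dict.get?_insert_self]
      · have hne : k ≠ p.1 := fun h => hk (by simp [h])
        simp [List.find?, hk, PySem.Dict.get?_insert_of_ne _ _ hne]

theorem pv_keys_rowOf {ν : Type} (V : (String × String) → ν) (fns : List (String × String)) (e : PySem.Dict String ν) :
    (pvRowOf V fns e).keys = PySem.Set.update e.keys (fns.map Prod.fst) := by
  exact PySem.Dict.keys_foldl_insert_key fns Prod.fst (fun _ p => V p) e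

theorem pv_nodup_keys_rowOf {ν : Type} (V : (String × String) → ν) (fns : List (String × String)) (e : PySem.Dict String ν) (h : e.keys.Nodup) :
    (pvRowOf V fns e).keys.Nodup :=
  PySem.Dict.nodup_keys_foldl_insert_key fns Prod.fst (fun _ p => V p) e h

theorem pv_set_update_of_subset {α : Type} [BEq α] [LawfulBEq α] (xs : List α) :
    ∀ s : PySem.Set α, (∀ x ∈ xs, x ∈ s) → PySem.Set.update s xs = s := by
  induction xs with
  | nil => intro s _; rfl
  | cons x l ih =>
    intro s h
    have hx : x ∈ s := h x (by simp)
    show PySem.Set.update (PySem.Set.add s x) l = s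
    rw [PySem.Set.add_of_mem hx]
    exact ih s (fun y hy => h y (by simp [hy]))

theorem pv_set_update_nil {α : Type} [BEq α] (xs : List α) :
    PySem.Set.update ([] : PySem.Set α) xs = PySem.Set.ofList xs := rfl

def pvPass2 (g : String → Option String) (strip : String) (called : List String) (r : PySem.Dict String Int) : PySem.Dict String Int :=
  called.foldl (fun r f =>
    match g f with
    | some short => if PySem.Str.isIn short strip then r.insert f 1 else r
    | none => r) r

def pvCondB (g : String → Option String) (strip : String) (k : String) : Bool :=
  match g k with
  | some s => PySem.Str.isIn s strip
  | none => false

theorem pv_keys_pass2 (g : String → Option String) (strip : String) :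
    ∀ (called : List String) (r : PySem.Dict String Int),
      (∀ f s, g f = some s → f ∈ r.keys) → (pvPass2 g strip called r).keys = r.keys := by
  intro called
  induction called with
  | nil => intro r _; rfl
  | cons f l ih =>
    intro r h
    show (pvPass2 g strip l
      (match g f with
       | some short => if PySem.Str.isIn short strip = true then r.insert f 1 else r
       | none => r)).keys = r.keys
    cases hg : g f with
    | none => exact ih r h
    | some s =>
      show (pvPass2 g strip l (if PySem.Str.isIn s strip = true then r.insert f 1 else r)).keys = r.keys
      by_cases hin : PySem.Str.isIn s strip = true
      · have hkeys : (r.insert f (1 : Int)).keys = r.keys :=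
          PySem.Dict.keys_insert_of_contains r 1
            ((PySem.Dict.contains_iff_mem_keys r f).mpr (h f s hg))
        have := ih (r.insert f 1) (fun f' s' hg' => by rw [hkeys]; exact h f' s' hg')
        rw [if_pos hin]
        rw [this, hkeys]
      · rw [if_neg hin]
        exact ih r h

theorem pv_get?_pass2 (g : String → Option String) (strip : String) :
    ∀ (called : List String) (r : PySem.Dict String Int) (k : String),
      (pvPass2 g strip called r).get? k =
        if k ∈ called ∧ pvCondB g strip k = true then some 1 else r.get? k := by
  intro called
  induction called with
  | nil => intro r k; simp [pvPass2]
  | cons f l ih =>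
    intro r k
    show (pvPass2 g strip l
      (match g f with
       | some short => if PySem.Str.isIn short strip = true then r.insert f 1 else r
       | none => r)).get? k = _
    rw [ih]
    by_cases hmem : k ∈ l ∧ pvCondB g strip k = true
    · rw [if_pos hmem, if_pos ⟨List.mem_cons_of_mem _ hmem.1, hmem.2⟩]
    · rw [if_neg hmem]
      cases hg : g f with
      | none =>
        have hr : ¬ (k ∈ f :: l ∧ pvCondB g strip k = true) := by
          rintro ⟨hm, hc⟩
          rcases List.mem_cons.mp hm with h | h
          · subst h; rw [pvCondB, hg] at hc; exact absurd hc (by simp)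
          · exact hmem ⟨h, hc⟩
        rw [if_neg hr]
      | some s =>
        show (if PySem.Str.isIn s strip = true then r.insert f 1 else r).get? k = _
        by_cases hin : PySem.Str.isIn s strip = true
        · rw [if_pos hin, PySem.Dict.get?_insert]
          by_cases hk : k = f
          · subst hk
            have hc : pvCondB g strip k = true := by rw [pvCondB, hg]; exact hin
            simp [hc]
          · have hr : ¬ (k ∈ f :: l ∧ pvCondB g strip k = true) := by
              rintro ⟨hm, hc⟩
              rcases List.mem_cons.mp hm with h | h
              · exact hk h
              · exact hmem ⟨h, hc⟩
            rw [if_neg hr, if_neg hk]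
        · rw [if_neg hin]
          have hr : ¬ (k ∈ f :: l ∧ pvCondB g strip k = true) := by
            rintro ⟨hm, hc⟩
            rcases List.mem_cons.mp hm with h | h
            · subst h; rw [pvCondB, hg] at hc; exact hin hc
            · exact hmem ⟨h, hc⟩
          rw [if_neg hr]

def pvVA (called : List String) (strip : String) (fp : String × String) : Int :=
  if called.contains fp.1 then (if PySem.Str.isIn fp.2 strip then 1 else 0) else 0

def pvCalledOf (cd : List (String × List String)) (t : String) : List String :=
  ((PySem.Dict.mk cd).get? t).getD []

def pvStripOf (tn : String) : String :=
  if PySem.Str.startswith tn "test_" then PySem.Str.slice tn (some 5) none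
  else PySem.Str.slice tn (some 4) none

theorem pv_find?_rev (fns : List (String × String)) (k : String) (h : k ∈ fns.map Prod.fst) :
    ∃ p, fns.reverse.find? (fun p => p.1 == k) = some p ∧ p.1 = k := by
  obtain ⟨p, hp, hpk⟩ := List.mem_map.mp h
  have hex : ∃ x ∈ fns.reverse, (fun q : String × String => q.1 == k) x = true :=
    ⟨p, List.mem_reverse.mpr hp, by simp [hpk]⟩
  obtain ⟨q, hq⟩ := Option.isSome_iff_exists.mp (List.find?_isSome.mpr hex)
  exact ⟨q, hq, by simpa using List.find?_some hq⟩

theorem pv_keys_rowOf_empty {ν : Type} (V : (String × String) → ν) (fns : List (String × String)) :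
    (pvRowOf V fns PySem.Dict.empty).keys = PySem.Set.ofList (fns.map Prod.fst) := by
  rw [pv_keys_rowOf, PySem.Dict.keys_empty, pv_set_update_nil]

theorem pv_rowOf_indep (V : (String × String) → Int) (fns : List (String × String))
    (e : PySem.Dict String Int)
    (hk : e.keys = PySem.Set.ofList (fns.map Prod.fst)) (hn : e.keys.Nodup) :
    pvRowOf V fns e = pvRowOf V fns PySem.Dict.empty := by
  apply PySem.Dict.ext
  have hk1 : (pvRowOf V fns e).keys = PySem.Set.ofList (fns.map Prod.fst) := by
    rw [pv_keys_rowOf, hk]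
    exact pv_set_update_of_subset _ _ (fun x hx => (PySem.Set.mem_ofList _ _).mpr hx)
  have hk2 := pv_keys_rowOf_empty V fns
  have hn1 : (pvRowOf V fns e).keys.Nodup := pv_nodup_keys_rowOf V fns e hn
  have hn2 : (pvRowOf V fns PySem.Dict.empty).keys.Nodup :=
    pv_nodup_keys_rowOf V fns _ (by rw [PySem.Dict.keys_empty]; exact List.nodup_nil)
  rw [PySem.Dict.items_eq_map_keys _ hn1 0, PySem.Dict.items_eq_map_keys _ hn2 0, hk1, hk2]
  apply List.map_congr_left
  intro k hkmem
  obtain ⟨p, hfind, hpk⟩ := pv_find?_rev fns k ((PySem.Set.mem_ofList _ _).mp hkmem)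
  rw [PySem.Dict.getD_eq_get?_getD, PySem.Dict.getD_eq_get?_getD, pv_get?_rowOf, pv_get?_rowOf, hfind]

theorem pv_rowB_eq (fns : List (String × String)) (called : List String) (strip : String) :
    pvPass2 (fun f => (pvRowOf (fun p => p.2) fns PySem.Dict.empty).get? f) strip called
      (pvRowOf (fun _ => (0 : Int)) fns PySem.Dict.empty)
    = pvRowOf (pvVA called strip) fns PySem.Dict.empty := by
  have hg : ∀ f s, (pvRowOf (fun p => p.2) fns PySem.Dict.empty).get? f = some s →
      f ∈ (pvRowOf (fun _ => (0 : Int)) fns PySem.Dict.empty).keys := by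
    intro f s hf
    rw [pv_keys_rowOf_empty]
    by_contra hmem
    have : f ∉ fns.map Prod.fst := fun hm => hmem ((PySem.Set.mem_ofList _ _).mpr hm)
    have hnone : (pvRowOf (fun p => p.2) fns PySem.Dict.empty).get? f = none := by
      rw [pv_get?_rowOf]
      cases hfind : fns.reverse.find? (fun p => p.1 == f) with
      | none => simp
      | some q =>
        exfalso
        have hq1 : q.1 = f := by simpa using List.find?_some hfind
        have hqm : q ∈ fns := List.mem_reverse.mp (List.mem_of_find?_eq_some hfind)
        exact this (hq1 ▸ List.mem_map.mpr ⟨q, hqm, rfl⟩)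
    rw [hnone] at hf; simp at hf
  apply PySem.Dict.ext
  have hkL : (pvPass2 (fun f => (pvRowOf (fun p => p.2) fns PySem.Dict.empty).get? f) strip called (pvRowOf (fun _ => (0 : Int)) fns PySem.Dict.empty)).keys
      = PySem.Set.ofList (fns.map Prod.fst) := by
    rw [pv_keys_pass2 _ _ called _ hg, pv_keys_rowOf_empty]
  have hnL : (pvPass2 (fun f => (pvRowOf (fun p => p.2) fns PySem.Dict.empty).get? f) strip called (pvRowOf (fun _ => (0 : Int)) fns PySem.Dict.empty)).keys.Nodup := by
    rw [hkL]; exact PySem.Set.nodup_ofList _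
  have hkR := pv_keys_rowOf_empty (pvVA called strip) fns
  have hnR : (pvRowOf (pvVA called strip) fns PySem.Dict.empty).keys.Nodup := by
    rw [hkR]; exact PySem.Set.nodup_ofList _
  rw [PySem.Dict.items_eq_map_keys _ hnL 0, PySem.Dict.items_eq_map_keys _ hnR 0, hkL, hkR]
  apply List.map_congr_left
  intro k hkmem
  obtain ⟨p, hfind, hpk⟩ := pv_find?_rev fns k ((PySem.Set.mem_ofList _ _).mp hkmem)
  rw [PySem.Dict.getD_eq_get?_getD, PySem.Dict.getD_eq_get?_getD]
  rw [pv_get?_pass2, pv_get?_rowOf, pv_get?_rowOf, hfind]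
  have hgk : pvCondB (fun f => (pvRowOf (fun p => p.2) fns PySem.Dict.empty).get? f) strip k
      = PySem.Str.isIn p.2 strip := by
    rw [pvCondB]
    rw [pv_get?_rowOf, hfind]
  by_cases hcall : k ∈ called
  · have hcon : called.contains k = true := List.elem_eq_true_of_mem hcall
    by_cases hisin : PySem.Str.isIn p.2 strip = true
    · rw [if_pos ⟨hcall, by rw [hgk]; exact hisin⟩]
      have hisin' : PySem.Chars.isIn p.2.toList strip.toList = true := by simpa using hisin
      simp [pvVA, hpk, hcall, hisin']
    · rw [if_neg (fun hc => hisin (hgk ▸ hc.2))]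
      have hisin' : ¬ PySem.Chars.isIn p.2.toList strip.toList = true := by simpa using hisin
      simp [pvVA, hpk, hcall, hisin']
  · rw [if_neg (fun hc => hcall hc.1)]
    simp [pvVA, hpk, hcall]

theorem pv_innerA_collapse (t : String) (V : (String × String) → Int) :
    ∀ (fns : List (String × String)) (res : PySem.Dict String (PySem.Dict String Int)) (r : PySem.Dict String Int),
      fns.foldl (fun d fp => d.insert t ((d.getD t PySem.Dict.empty).insert fp.1 (V fp))) (res.insert t r)
        = res.insert t (pvRowOf V fns r) := by
  intro fns
  induction fns with
  | nil => intro res r; rfl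
  | cons fp l ih =>
    intro res r
    show l.foldl _ ((res.insert t r).insert t (((res.insert t r).getD t PySem.Dict.empty).insert fp.1 (V fp))) = _
    rw [PySem.Dict.getD_insert_self, PySem.Dict.insert_insert_self]
    exact ih res (r.insert fp.1 (V fp))

theorem pv_stepA_eq (t : String) (V : (String × String) → Int) (fp : String × String)
    (l : List (String × String)) (res : PySem.Dict String (PySem.Dict String Int)) :
    (fp :: l).foldl (fun d q => d.insert t ((d.getD t PySem.Dict.empty).insert q.1 (V q))) res
      = res.insert t (pvRowOf V (fp :: l) (res.getD t PySem.Dict.empty)) := by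
  show l.foldl _ (res.insert t ((res.getD t PySem.Dict.empty).insert fp.1 (V fp))) = _
  exact pv_innerA_collapse t V l res ((res.getD t PySem.Dict.empty).insert fp.1 (V fp))

theorem pv_size_eq_keys_length {κ ν : Type} [BEq κ] (d : PySem.Dict κ ν) :
    d.size = d.keys.length := by
  simp [PySem.Dict.size, PySem.Dict.keys]

theorem pv_step_eq (fns : List (String × String)) (cd : List (String × List String))
    (tp : String × String) (res : PySem.Dict String (PySem.Dict String Int))
    (hinv : ∀ p ∈ res.items, p.2.keys = PySem.Set.ofList (fns.map Prod.fst)) :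
    fns.foldl (fun d fp => d.insert tp.1 ((d.getD tp.1 PySem.Dict.empty).insert fp.1
        (pvVA (pvCalledOf cd tp.1) (pvStripOf tp.2) fp))) res
    = (if (pvPass2 (fun f => (pvRowOf (fun p => p.2) fns PySem.Dict.empty).get? f)
            (pvStripOf tp.2) (pvCalledOf cd tp.1)
            (pvRowOf (fun _ => (0 : Int)) fns PySem.Dict.empty)).size ≠ 0
       then res.insert tp.1
            (pvPass2 (fun f => (pvRowOf (fun p => p.2) fns PySem.Dict.empty).get? f)
              (pvStripOf tp.2) (pvCalledOf cd tp.1)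
              (pvRowOf (fun _ => (0 : Int)) fns PySem.Dict.empty))
       else res) := by
  rw [pv_rowB_eq]
  cases hfns : fns with
  | nil =>
    have hsz : (pvRowOf (pvVA (pvCalledOf cd tp.1) (pvStripOf tp.2)) ([] : List (String × String)) PySem.Dict.empty).size = 0 := by
      rfl
    rw [if_neg (by rw [hsz]; simp)]
    rfl
  | cons fp fl =>
    have hkeys := pv_keys_rowOf_empty (pvVA (pvCalledOf cd tp.1) (pvStripOf tp.2)) (fp :: fl)
    have hsz : (pvRowOf (pvVA (pvCalledOf cd tp.1) (pvStripOf tp.2)) (fp :: fl) PySem.Dict.empty).size ≠ 0 := by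
      rw [pv_size_eq_keys_length, hkeys]
      intro hlen
      have : fp.1 ∈ PySem.Set.ofList ((fp :: fl).map Prod.fst) :=
        (PySem.Set.mem_ofList _ _).mpr (by simp)
      rw [List.length_eq_zero_iff.mp hlen] at this
      simp at this
    rw [if_pos hsz]
    rw [pv_stepA_eq tp.1 (pvVA (pvCalledOf cd tp.1) (pvStripOf tp.2)) fp fl res]
    cases hq : res.get? tp.1 with
    | none =>
      rw [PySem.Dict.getD_eq_get?_getD, hq]
      rfl
    | some v =>
      rw [PySem.Dict.getD_eq_get?_getD, hq]
      have hv : v.keys = PySem.Set.ofList ((fp :: fl).map Prod.fst) := by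
        have := hinv (tp.1, v) (PySem.Dict.mem_items_of_get?_eq_some res hq)
        rwa [hfns] at this
      have hvn : v.keys.Nodup := by rw [hv]; exact PySem.Set.nodup_ofList _
      rw [show (some v).getD PySem.Dict.empty = v from rfl]
      rw [pv_rowOf_indep _ _ v hv hvn]

theorem pv_main (fns : List (String × String)) (cd : List (String × List String)) :
    ∀ (tns : List (String × String)) (res : PySem.Dict String (PySem.Dict String Int)),
      res.keys.Nodup →
      (∀ p ∈ res.items, p.2.keys = PySem.Set.ofList (fns.map Prod.fst)) →
      tns.foldl (fun d tp => fns.foldl (fun d fp =>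
          d.insert tp.1 ((d.getD tp.1 PySem.Dict.empty).insert fp.1
            (pvVA (pvCalledOf cd tp.1) (pvStripOf tp.2) fp))) d) res
      = tns.foldl (fun r tp =>
          if (pvPass2 (fun f => (pvRowOf (fun p => p.2) fns PySem.Dict.empty).get? f)
                (pvStripOf tp.2) (pvCalledOf cd tp.1)
                (pvRowOf (fun _ => (0 : Int)) fns PySem.Dict.empty)).size ≠ 0
          then r.insert tp.1
               (pvPass2 (fun f => (pvRowOf (fun p => p.2) fns PySem.Dict.empty).get? f)
                 (pvStripOf tp.2) (pvCalledOf cd tp.1)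
                 (pvRowOf (fun _ => (0 : Int)) fns PySem.Dict.empty))
          else r) res := by
  intro tns
  induction tns with
  | nil => intro res _ _; rfl
  | cons tp l ih =>
    intro res hnd hinv
    rw [List.foldl_cons, List.foldl_cons]
    have hstep := pv_step_eq fns cd tp res hinv
    show l.foldl _ (fns.foldl (fun d fp =>
        d.insert tp.1 ((d.getD tp.1 PySem.Dict.empty).insert fp.1
          (pvVA (pvCalledOf cd tp.1) (pvStripOf tp.2) fp))) res) = l.foldl _ _
    rw [hstep]
    by_cases hsz : (pvPass2 (fun f => (pvRowOf (fun p => p.2) fns PySem.Dict.empty).get? f)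
        (pvStripOf tp.2) (pvCalledOf cd tp.1)
        (pvRowOf (fun _ => (0 : Int)) fns PySem.Dict.empty)).size ≠ 0
    · rw [if_pos hsz]
      apply ih
      · exact PySem.Dict.nodup_keys_insert res tp.1 _ hnd
      · intro p hp
        rcases (PySem.Dict.mem_items_insert res tp.1 _ p).mp hp with h | h
        · subst h
          rw [pv_rowB_eq, pv_keys_rowOf_empty]
        · exact hinv p h.1
    · rw [if_neg hsz]
      exact ih res hnd hinv

theorem pv_final (fns tns : List (String × String)) (cd : List (String × List String)) :
    naming_convention_contains fns tns cd = naming_convention_contains_alt fns tns cd := by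
  have hk : (PySem.Dict.empty : PySem.Dict String (PySem.Dict String Int)).keys.Nodup := by
    rw [PySem.Dict.keys_empty]; exact List.nodup_nil
  have hi : ∀ p ∈ (PySem.Dict.empty : PySem.Dict String (PySem.Dict String Int)).items,
      p.2.keys = PySem.Set.ofList (fns.map Prod.fst) := by
    intro p hp
    cases hp
  have h := pv_main fns cd tns PySem.Dict.empty hk hi
  exact congrArg (fun d : PySem.Dict String (PySem.Dict String Int) =>
    d.items.map (fun p => (p.1, p.2.items))) h

-- ===== VERDICT (by name: the statement is the Claim_ definition above) =====
theorem naming_convention_contains_spec : Claim_equal_naming_convention_contains := by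
  intro function_names_tuple test_names_tuple functions_called_by_each_test_dict _ _
  exact pv_final function_names_tuple test_names_tuple functions_called_by_each_test_dict
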